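-- pv_equiv track=rewrite | github.com/TadejMohorcic/advent-of-code | 2016/2016-11.py | number_of_steps
-- ===== SOURCE A (Python) =====
-- def number_of_steps(floor_list):
--     floors_copy = floor_list.copy()
--
--     steps = 0
--     current_floor = 0
--     n = len(floors_copy) - 1
--     elements = sum(floors_copy)
--
--     while floors_copy[n] != elements:
--         current_elements = floors_copy[current_floor]
--         steps += 2 * (current_elements - 1) - 1
--         floors_copy[current_floor] = 0
--         current_floor += 1
--         floors_copy[current_floor] += current_elements
--
--     return steps
-- ===== SOURCE B (Python) =====
-- def number_of_steps(floor_list):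
--     total = sum(floor_list)
--     if floor_list[-1] == total:
--         return 0
--     n = len(floor_list) - 1
--     return 2 * sum(c * (n - j) for j, c in enumerate(floor_list[:n])) - 3 * n
-- ===== Notes on version B (the rewrite author's own statement) =====
-- stated objective: faster
-- what changed: Replaces A's mutating floor-by-floor simulation (copying the list, zeroing floors, carrying elements upward in a while loop) with a single closed-form weighted sum 2*sum(c*(n-j)) - 3*n after the same top-floor early-exit check.
import Mathlib
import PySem

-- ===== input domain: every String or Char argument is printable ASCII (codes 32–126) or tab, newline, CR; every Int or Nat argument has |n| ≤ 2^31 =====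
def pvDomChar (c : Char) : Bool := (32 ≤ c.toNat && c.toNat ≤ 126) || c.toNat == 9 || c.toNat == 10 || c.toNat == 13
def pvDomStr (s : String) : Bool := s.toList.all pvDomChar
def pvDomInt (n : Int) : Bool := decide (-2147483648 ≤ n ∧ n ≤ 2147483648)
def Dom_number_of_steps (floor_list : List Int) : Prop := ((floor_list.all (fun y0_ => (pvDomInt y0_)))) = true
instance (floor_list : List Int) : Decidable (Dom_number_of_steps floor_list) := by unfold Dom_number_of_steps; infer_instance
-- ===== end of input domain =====

-- B replaces A's mutating floor-by-floor simulation with a closed-form weighted sum (objective: faster constant factor, no copy/mutation).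
-- A copies floor_list and never mutates the argument; neither program has observable side effects.

-- ===== PORT A =====
-- The while loop, as fuel recursion; fuel = floor_list.length suffices (the loop
-- runs at most length-1 iterations), proved via the invariant below.  pyGetD's
-- default 0 is never used under Pre_ (the only out-of-range access, floors[-1]
-- on the empty list, is excluded by Pre_ as Python's IndexError).
def numberOfStepsLoop (fuel : Nat) (floors : List Int) (steps current_floor n elements : Int) : Int :=
  match fuel with
  | 0 => steps
  | fuel + 1 =>
    if PySem.List.pyGetD floors n 0 ≠ elements then
      let current_elements := PySem.List.pyGetD floors current_floor 0
      let steps := steps + (2 * (current_elements - 1) - 1)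
      let floors := PySem.List.pySetD floors current_floor 0
      let current_floor := current_floor + 1
      let floors := PySem.List.pySetD floors current_floor
        (PySem.List.pyGetD floors current_floor 0 + current_elements)
      numberOfStepsLoop fuel floors steps current_floor n elements
    else steps

def number_of_steps (floor_list : List Int) : Int :=
  let floors_copy := floor_list
  let n : Int := (floor_list.length : Int) - 1
  let elements : Int := floors_copy.sum
  numberOfStepsLoop floor_list.length floors_copy 0 0 n elements

-- ===== PORT B =====
def number_of_steps_alt (floor_list : List Int) : Int :=
  let total : Int := floor_list.sum
  if PySem.List.pyGetD floor_list (-1) 0 = total then 0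
  else
    let n : Int := (floor_list.length : Int) - 1
    2 * ((PySem.List.enumerate (PySem.List.slice floor_list none (some n)) 0).foldl
          (fun acc jc => acc + jc.2 * (n - jc.1)) 0) - 3 * n

-- ===== PRECONDITION & SPEC =====
-- Pre_ excludes only the empty list, on which A (floors_copy[-1]) raises IndexError (B raises there too).
def Pre_number_of_steps (floor_list : List Int) : Prop := floor_list ≠ []
instance (floor_list : List Int) : Decidable (Pre_number_of_steps floor_list) := by unfold Pre_number_of_steps; infer_instance
def pvWitness_number_of_steps : List Int := [1, 2, 3]

def Spec_number_of_steps (floor_list : List Int) (out : Int) : Prop := out = number_of_steps_alt floor_list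
instance (floor_list : List Int) (out : Int) : Decidable (Spec_number_of_steps floor_list out) := by unfold Spec_number_of_steps; infer_instance

-- ===== CLAIM (what is proved, stated in full; the proofs are below) =====
def Claim_equal_number_of_steps : Prop := ∀ (floor_list : List Int), Dom_number_of_steps floor_list → Pre_number_of_steps floor_list → Spec_number_of_steps floor_list (number_of_steps floor_list)

-- ===== LEMMAS AND PROOFS =====

-- Abstract cost of A's loop: one pass over the floors above the current one,
-- carrying the running pile P.
def goCost (P : Int) : List Int → Int
  | [] => 0
  | r :: rs => (2 * (P - 1) - 1) + goCost (r + P) rs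

-- Weighted sum with weights |suffix| (i.e. rest[j] * (|rest| - 1 - j)).
def wSum : List Int → Int
  | [] => 0
  | r :: rs => r * (rs.length : Int) + wSum rs

theorem goCost_eq (P : Int) (rest : List Int) :
    goCost P rest = 2 * (P * rest.length + wSum rest) - 3 * rest.length := by
  induction rest generalizing P with
  | nil => simp [goCost, wSum]
  | cons r rs ih =>
    simp only [goCost, wSum, ih (r + P), List.length_cons]
    push_cast
    ring

-- The loop invariant: after i iterations A's state is replicate i 0 ++ P :: rest
-- (P the pile carried so far), and the loop adds goCost P rest to steps.
theorem loop_inv (rest : List Int) : ∀ (i fuel : Nat) (P s : Int),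
    rest.length < fuel →
    rest.getLast? ≠ some (P + rest.sum) →
    numberOfStepsLoop fuel (List.replicate i 0 ++ P :: rest) s (i : Int)
      ((i : Int) + (rest.length : Int)) (P + rest.sum)
      = s + goCost P rest := by
  induction rest with
  | nil =>
    intro i fuel P s hf _
    obtain ⟨f, rfl⟩ : ∃ f, fuel = f + 1 := ⟨fuel - 1, by omega⟩
    simp only [numberOfStepsLoop, List.length_nil, List.sum_nil]
    have hget : PySem.List.pyGetD (List.replicate i 0 ++ [P]) ((i : Int) + 0) 0 = P := by
      have h0 : ((i : Int) + 0) = ((i : Nat) : Int) := by ring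
      rw [h0, PySem.List.pyGetD_natCast]
      simp [List.getD]
    simp [goCost]
  | cons r rs ih =>
    intro i fuel P s hf hlast
    obtain ⟨f, rfl⟩ : ∃ f, fuel = f + 1 := ⟨fuel - 1, by omega⟩
    have hL : (r :: rs).getLast? = some ((r :: rs).getLast (by simp)) :=
      List.getLast?_eq_some_getLast (by simp)
    -- floors[n] is the last element of r :: rs
    have hcond : PySem.List.pyGetD (List.replicate i 0 ++ P :: r :: rs)
        ((i : Int) + ((r :: rs).length : Int)) 0 = (r :: rs).getLast (by simp) := by
      have h1 : ((i : Int) + ((r :: rs).length : Int)) = ((i + (r :: rs).length : Nat) : Int) := by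
        push_cast; ring
      rw [h1, PySem.List.pyGetD_natCast]
      simp [List.getD, List.getLast_eq_getElem]
    have hlast' : (r :: rs).getLast (by simp) ≠ P + (r :: rs).sum := by
      intro h
      exact hlast (by rw [hL, h])
    simp only [numberOfStepsLoop, hcond, if_pos (by exact hlast' : ¬ _ = _)]
    -- current element is P
    have hcur : PySem.List.pyGetD (List.replicate i 0 ++ P :: r :: rs) ((i : Int)) 0 = P := by
      rw [PySem.List.pyGetD_natCast]
      simp [List.getD]
    rw [hcur]
    -- set current floor to 0
    have hset1 : PySem.List.pySetD (List.replicate i 0 ++ P :: r :: rs) ((i : Int)) 0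
        = List.replicate i 0 ++ 0 :: r :: rs := by
      rw [PySem.List.pySetD_natCast, List.set_append]
      simp
    rw [hset1]
    have hi1 : ((i : Int) + 1) = ((i + 1 : Nat) : Int) := by push_cast; ring
    -- read the next floor
    have hget2 : PySem.List.pyGetD (List.replicate i 0 ++ 0 :: r :: rs) ((i : Int) + 1) 0 = r := by
      rw [hi1, PySem.List.pyGetD_natCast]
      simp [List.getD]
    rw [hget2]
    -- set the next floor
    have hset2 : PySem.List.pySetD (List.replicate i 0 ++ 0 :: r :: rs) ((i : Int) + 1) (r + P)
        = List.replicate (i + 1) 0 ++ (r + P) :: rs := by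
      rw [hi1, PySem.List.pySetD_natCast, List.set_append]
      simp [List.replicate_succ' (n := i)]
    rw [hset2]
    -- the loop hypothesis is preserved
    have hlast2 : rs.getLast? ≠ some ((r + P) + rs.sum) := by
      cases rs with
      | nil => simp
      | cons b bs =>
        rw [← List.getLast?_cons_cons (a := r)]
        intro h
        apply hlast
        rw [h]
        congr 1
        simp
        ring
    have harg1 : ((i : Int) + ((r :: rs).length : Int)) = (((i + 1 : Nat) : Int) + (rs.length : Int)) := by
      push_cast [List.length_cons]; ring
    have harg2 : P + (r :: rs).sum = (r + P) + rs.sum := by simp; ring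
    rw [harg1, harg2, hi1,
      ih (i + 1) f (r + P) (s + (2 * (P - 1) - 1)) (by simpa using hf) hlast2]
    simp only [goCost]
    ring

-- B's fold over enumerate, with weights (n - j), n = start + length.
theorem foldB_eq (ys : List Int) : ∀ (j s n : Int), n = j + (ys.length : Int) →
    (PySem.List.enumerate ys j).foldl (fun acc jc => acc + jc.2 * (n - jc.1)) s
      = s + wSum ys + ys.sum := by
  induction ys with
  | nil => intro j s n _; simp [PySem.List.enumerate_nil, wSum]
  | cons c cs ih =>
    intro j s n hn
    rw [PySem.List.enumerate_cons, List.foldl_cons,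
      ih (j + 1) (s + c * (n - j)) n (by simp at hn ⊢; omega)]
    have h1 : n - j = (cs.length : Int) + 1 := by simp at hn; omega
    simp only [wSum, List.sum_cons, h1]
    ring

theorem wSum_dropLast (xs : List Int) (h : xs ≠ []) :
    wSum xs.dropLast + xs.dropLast.sum = wSum xs := by
  induction xs with
  | nil => simp at h
  | cons r rs ih =>
    cases rs with
    | nil => simp [wSum]
    | cons b bs =>
      have hne : (b :: bs) ≠ [] := by simp
      rw [List.dropLast_cons_of_ne_nil hne]
      have hlen : (((b :: bs).dropLast.length : Nat) : Int) = (bs.length : Int) := by simp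
      have ih' := ih hne
      simp only [wSum, List.sum_cons, hlen] at ih' ⊢
      push_cast [List.length_cons]
      linear_combination ih'

-- ===== VERDICT (by name: the statement is the Claim_ definition above) =====
theorem number_of_steps_spec : Claim_equal_number_of_steps := by
  intro floor_list _ hpre
  unfold Pre_number_of_steps at hpre
  unfold Spec_number_of_steps
  simp only [number_of_steps, number_of_steps_alt]
  obtain ⟨x, xs, rfl⟩ : ∃ y ys, floor_list = y :: ys := by
    cases floor_list with
    | nil => exact absurd rfl hpre
    | cons y ys => exact ⟨y, ys, rfl⟩
  have hne : (x :: xs) ≠ [] := by simp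
  rw [PySem.List.pyGetD_neg_one _ 0 hne]
  have hget : PySem.List.pyGetD (x :: xs) (((x :: xs).length : Int) - 1) 0
      = (x :: xs).getLast hne := by
    have h0 : (((x :: xs).length : Int) - 1) = ((xs.length : Nat) : Int) := by simp
    rw [h0, PySem.List.pyGetD_natCast]
    simp [List.getD, List.getLast_eq_getElem]
    rfl
  by_cases hlast : (x :: xs).getLast hne = (x :: xs).sum
  · -- top floor already holds everything: the loop exits at once, B returns 0
    rw [if_pos hlast]
    show numberOfStepsLoop (xs.length + 1) _ _ _ _ _ = 0
    rw [numberOfStepsLoop]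
    rw [hget, if_neg (by simp [hlast])]
  · -- general case: the loop runs xs.length iterations
    rw [if_neg hlast]
    obtain ⟨b, bs, rfl⟩ : ∃ b bs, xs = b :: bs := by
      cases xs with
      | nil => simp [List.getLast] at hlast
      | cons b bs => exact ⟨b, bs, rfl⟩
    -- A's side via the invariant
    have hl2 : (b :: bs).getLast? ≠ some (x + (b :: bs).sum) := by
      rw [← List.getLast?_cons_cons (a := x), List.getLast?_eq_some_getLast hne]
      intro h
      apply hlast
      simpa using h
    have hA : numberOfStepsLoop (x :: b :: bs).length (x :: b :: bs) 0 0
        (((x :: b :: bs).length : Int) - 1) (x :: b :: bs).sum = goCost x (b :: bs) := by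
      have hinv := loop_inv (b :: bs) 0 (x :: b :: bs).length x 0 (by simp) hl2
      simp only [List.replicate_zero, List.nil_append, Nat.cast_zero, zero_add] at hinv
      have harg : (((x :: b :: bs).length : Int) - 1) = (((b :: bs).length : Nat) : Int) := by
        simp
      have harg2 : (x :: b :: bs).sum = x + (b :: bs).sum := by simp
      rw [harg, harg2, hinv]
    rw [hA, goCost_eq]
    -- B's side: the slice is dropLast, the fold is wSum + sum
    have hslice : PySem.List.slice (x :: b :: bs) none (some (((x :: b :: bs).length : Int) - 1))
        = (x :: b :: bs).dropLast := by
      rw [PySem.List.slice_to _ (by simp only [List.length_cons]; push_cast; omega), List.dropLast_eq_take]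
      congr 1
      simp
    rw [hslice, foldB_eq _ 0 0 _ (by simp [List.length_dropLast]),
      List.dropLast_cons_of_ne_nil (by simp : (b :: bs) ≠ [])]
    simp only [wSum, List.sum_cons, List.length_dropLast, List.length_cons]
    have hw := wSum_dropLast (b :: bs) (by simp)
    simp only [wSum] at hw
    push_cast
    linear_combination (-2) * hw
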